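-- pv_equiv track=rewrite | github.com/posl/comment_recommendation | script/split_gen/2_time/zh/216_C/5.py | solve
-- ===== SOURCE A (Python) =====
-- def solve(n):
--     ans = []
--     while n > 0:
--         if n % 2 == 0:
--             n = n // 2
--             ans.append("B")
--         else:
--             n -= 1
--             ans.append("A")
--     return "".join(ans[::-1])
-- ===== SOURCE B (Python) =====
-- def solve(n):
--     # Forward construction from the binary representation: the answer is "A"
--     # for the leading bit, then "B" (+"A" if the bit is 1) for each later bit.
--     if n <= 0:
--         return ""
--     out = ["A"]
--     for b in bin(n)[3:]:  # skip "0b" and the leading 1-bit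
--         out.append("B")
--         if b == '1':
--             out.append("A")
--     return "".join(out)
-- ===== Notes on version B (the rewrite author's own statement) =====
-- stated objective: alternative
-- what changed: Replaced the backward accumulate-then-reverse halving loop by a forward construction over the binary representation of n (bin(n)): 'A' for the leading bit, then 'B' plus an optional 'A' per later bit, no reversal.
import Mathlib
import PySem

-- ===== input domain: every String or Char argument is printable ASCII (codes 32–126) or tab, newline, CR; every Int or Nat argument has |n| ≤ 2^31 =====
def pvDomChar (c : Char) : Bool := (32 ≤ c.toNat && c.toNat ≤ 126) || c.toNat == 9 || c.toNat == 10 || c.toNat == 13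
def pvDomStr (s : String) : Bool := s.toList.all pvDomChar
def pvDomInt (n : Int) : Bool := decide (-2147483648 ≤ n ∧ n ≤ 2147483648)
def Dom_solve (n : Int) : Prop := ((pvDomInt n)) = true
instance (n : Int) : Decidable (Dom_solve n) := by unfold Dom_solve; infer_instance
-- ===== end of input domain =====

-- B builds the answer forward from the binary representation of n (bin(n)),
-- instead of A's backward accumulate-then-reverse halving loop (objective: alternative).

-- ===== PORT A =====
-- the while loop of A: state = (n, ans); appends to ans, updates n
def solveLoop (n : Int) (ans : List String) : List String :=
  if 0 < n then
    if PySem.Int.mod n 2 = 0 then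
      solveLoop (PySem.Int.floordiv n 2) (ans ++ ["B"])
    else
      solveLoop (n - 1) (ans ++ ["A"])
  else ans
termination_by n.toNat
decreasing_by
  · have h := PySem.Int.floordiv_eq_ediv_of_pos (a := n) (b := 2) (by omega)
    rw [h]; omega
  · omega

def solve (n : Int) : String := String.join (solveLoop n []).reverse

-- ===== PORT B =====
-- bin(n) for n ≥ 1, without the "0b" prefix: binary digits, most significant first
def pyBinDigits (n : Int) : List Char :=
  if n < 2 then [if n = 1 then '1' else '0']
  else pyBinDigits (n / 2) ++ [if n % 2 = 1 then '1' else '0']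
termination_by n.toNat
decreasing_by omega

def solve_alt (n : Int) : String :=
  if n ≤ 0 then ""
  else
    -- out = ["A"]; for b in bin(n)[3:]: out += ["B"] (+ ["A"] if b == '1')
    let out := ((pyBinDigits n).drop 1).foldl
      (fun out b => (out ++ ["B"]) ++ (if b = '1' then ["A"] else [])) ["A"]
    String.join out

-- ===== PRECONDITION & SPEC =====
def Spec_solve (n : Int) (out : String) : Prop := out = solve_alt n
instance (n : Int) (out : String) : Decidable (Spec_solve n out) := by unfold Spec_solve; infer_instance

-- ===== CLAIM (what is proved, stated in full; the proofs are below) =====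
def Claim_equal_solve : Prop := ∀ (n : Int), Dom_solve n → Spec_solve n (solve n)

-- ===== LEMMAS AND PROOFS =====

-- reference recurrence used only as a proof middleman between the two ports
def solveRec (n : Int) : String :=
  if 0 < n then
    if PySem.Int.mod n 2 = 0 then
      solveRec (PySem.Int.floordiv n 2) ++ "B"
    else
      solveRec (n - 1) ++ "A"
  else ""
termination_by n.toNat
decreasing_by
  · have h := PySem.Int.floordiv_eq_ediv_of_pos (a := n) (b := 2) (by omega)
    rw [h]; omega
  · omega

lemma foldl_append_pull (tl : List String) (x a : String) :
    List.foldl (fun r s => r ++ s) (x ++ a) tl = x ++ List.foldl (fun r s => r ++ s) a tl := by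
  induction tl generalizing a with
  | nil => simp
  | cons b tl ih => simp only [List.foldl_cons, String.append_assoc, ih]

lemma join_reverse_append (ans : List String) (x : String) :
    String.join (ans ++ [x]).reverse = x ++ String.join ans.reverse := by
  have h := foldl_append_pull ans.reverse x ""
  simp only [String.join, List.reverse_append, List.reverse_singleton, List.singleton_append,
    List.foldl_cons]
  simpa using h

lemma solveLoop_join (n : Int) (ans : List String) :
    String.join (solveLoop n ans).reverse = solveRec n ++ String.join ans.reverse := by
  induction n, ans using solveLoop.induct with
  | case1 n ans hpos heven ih =>
    rw [solveLoop, if_pos hpos, if_pos heven, ih, join_reverse_append]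
    conv_rhs => rw [solveRec, if_pos hpos, if_pos heven]
    rw [String.append_assoc]
  | case2 n ans hpos hodd ih =>
    rw [solveLoop, if_pos hpos, if_neg hodd, ih, join_reverse_append]
    conv_rhs => rw [solveRec, if_pos hpos, if_neg hodd]
    rw [String.append_assoc]
  | case3 n ans hpos =>
    rw [solveLoop, if_neg hpos, solveRec, if_neg hpos]
    simp

lemma pyBinDigits_ne_nil (n : Int) : pyBinDigits n ≠ [] := by
  rw [pyBinDigits]
  split <;> simp

-- the B-side foldl, run over an appended digit
lemma foldl_B_append (l : List Char) (b : Char) (init : List String) :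
    (l ++ [b]).foldl (fun out b => (out ++ ["B"]) ++ (if b = '1' then ["A"] else [])) init
    = ((l.foldl (fun out b => (out ++ ["B"]) ++ (if b = '1' then ["A"] else [])) init)
        ++ ["B"]) ++ (if b = '1' then ["A"] else []) := by
  simp [List.foldl_append]

-- core: for n ≥ 1 the recurrence equals B's forward construction
lemma solveRec_eq_bin : ∀ (k : Nat) (n : Int), n.toNat = k → 0 < n →
    solveRec n
    = String.join (((pyBinDigits n).drop 1).foldl
        (fun out b => (out ++ ["B"]) ++ (if b = '1' then ["A"] else [])) ["A"]) := by
  intro k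
  induction k using Nat.strong_induction_on with
  | _ k ih =>
    intro n hk hpos
    have hm : PySem.Int.mod n 2 = n % 2 := PySem.Int.mod_eq_emod_of_pos (by omega)
    have h2 : PySem.Int.floordiv n 2 = n / 2 :=
      PySem.Int.floordiv_eq_ediv_of_pos (by omega)
    by_cases h1 : n = 1
    · subst h1
      rw [solveRec, if_pos (by norm_num), if_neg (by rw [hm]; norm_num)]
      rw [solveRec, if_neg (by norm_num)]
      rw [pyBinDigits]
      norm_num
      simp [String.join]
    · have hn2 : (2:Int) ≤ n := by omega
      have hhalf : 0 < n / 2 := by omega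
      have hlt : (n / 2).toNat < k := by omega
      have hIH := ih _ hlt (n / 2) rfl hhalf
      have hdig : pyBinDigits n
          = pyBinDigits (n / 2) ++ [if n % 2 = 1 then '1' else '0'] := by
        rw [pyBinDigits, if_neg (by omega : ¬ n < 2)]
      have hnil := pyBinDigits_ne_nil (n / 2)
      have hfold : String.join (((pyBinDigits n).drop 1).foldl
            (fun out b => (out ++ ["B"]) ++ (if b = '1' then ["A"] else [])) ["A"])
          = solveRec (n / 2) ++ "B"
            ++ (if n % 2 = 1 then "A" else "") := by
        rw [hdig, List.drop_one, List.tail_append_of_ne_nil hnil, ← List.drop_one,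
          foldl_B_append, hIH]
        by_cases hb : n % 2 = 1
        · simp [hb, String.join]
        · simp [hb, String.join]
      rw [hfold]
      by_cases hb : n % 2 = 1
      · -- odd n ≥ 3: A-step to n-1, then B-step to (n-1)/2 = n/2
        rw [solveRec, if_pos hpos, if_neg (by rw [hm]; omega)]
        have hm' : PySem.Int.mod (n-1) 2 = (n-1) % 2 :=
          PySem.Int.mod_eq_emod_of_pos (by omega)
        have h2' : PySem.Int.floordiv (n-1) 2 = (n-1) / 2 :=
          PySem.Int.floordiv_eq_ediv_of_pos (by omega)
        rw [solveRec, if_pos (by omega : (0:Int) < n - 1),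
          if_pos (by rw [hm']; omega), h2',
          (by omega : (n - 1) / 2 = n / 2), if_pos hb, String.append_assoc]
      · rw [solveRec, if_pos hpos, if_pos (by rw [hm]; omega), h2, if_neg hb]
        simp

-- ===== VERDICT (by name: the statement is the Claim_ definition above) =====
theorem solve_spec : Claim_equal_solve := by
  intro n _
  unfold Spec_solve solve solve_alt
  rw [solveLoop_join]
  by_cases h : 0 < n
  · rw [if_neg (by omega : ¬ n ≤ 0), ← solveRec_eq_bin n.toNat n rfl h]
    simp [String.join]
  · rw [if_pos (by omega : n ≤ 0), solveRec, if_neg h]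
    simp [String.join]
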